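-- pv_equiv track=rewrite | github.com/ThanoSnake/data_base_2025 | code/performance_artist_insert.py | check_consecutive_years
-- ===== SOURCE A (Python) =====
-- def check_consecutive_years(years_list, new_year, max_consecutive=3):
--     if not years_list:
--         return True
--
--     # Δημιουργία λίστας μοναδικών ετών με το νέο έτος
--     unique_years = sorted(list(set(years_list + [new_year])))
--
--     max_consec = 1
--     current_consec = 1
--
--     for i in range(1, len(unique_years)):
--         if unique_years[i] == unique_years[i-1] + 1:
--             current_consec += 1
--             max_consec = max(max_consec, current_consec)
--         else:
--             current_consec = 1
--
--     return max_consec <= max_consecutive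
-- ===== SOURCE B (Python) =====
-- def check_consecutive_years(years_list, new_year, max_consecutive=3):
--     if not years_list:
--         return True
--     s = set(years_list)
--     s.add(new_year)
--     for y in s:
--         k = 0
--         while k <= max_consecutive and (y + k) in s:
--             k += 1
--         if k > max_consecutive:
--             return False
--     return True
-- ===== Notes on version B (the rewrite author's own statement) =====
-- stated objective: alternative
-- what changed: B drops A's sort-and-scan run counter: it builds a hash set and for each member counts forward consecutive membership, capped at max_consecutive+1, returning False iff some member starts a run longer than max_consecutive.
import Mathlib
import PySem

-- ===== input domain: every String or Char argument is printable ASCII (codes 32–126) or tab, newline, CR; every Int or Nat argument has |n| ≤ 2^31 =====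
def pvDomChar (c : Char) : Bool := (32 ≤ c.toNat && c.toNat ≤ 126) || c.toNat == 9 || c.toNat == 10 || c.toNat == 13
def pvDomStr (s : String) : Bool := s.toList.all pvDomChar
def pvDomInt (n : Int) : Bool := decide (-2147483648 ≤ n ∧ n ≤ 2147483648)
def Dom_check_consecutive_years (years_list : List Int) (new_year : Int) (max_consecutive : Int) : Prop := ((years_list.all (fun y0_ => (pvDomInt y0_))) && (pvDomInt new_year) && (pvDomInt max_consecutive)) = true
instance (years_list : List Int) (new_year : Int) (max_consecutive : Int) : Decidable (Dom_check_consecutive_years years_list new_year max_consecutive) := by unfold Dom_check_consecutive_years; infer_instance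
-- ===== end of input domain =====

-- B replaces A's sort-and-scan run counter by a hash-set window test (no sort, no max tracking):
-- an alternative algorithm of similar cost; equivalence of the RETURN value is proved below.

-- ===== PORT A =====
-- literal transliteration of A: sort the deduplicated years, scan adjacent pairs counting runs
def check_consecutive_years (years_list : List Int) (new_year : Int) (max_consecutive : Int) : Bool :=
  if years_list = [] then true
  else
    let unique_years : List Int :=
      PySem.List.sorted (PySem.Set.ofList (years_list ++ [new_year])) (fun x => x) false
    let st :=
      (PySem.List.pyRange 1 (PySem.List.len unique_years) 1).foldl
        (fun (st : Int × Int) i =>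
          -- index i ranges over 1..len-1, so both accesses are always in range
          if PySem.List.pyGetD unique_years i 0 = PySem.List.pyGetD unique_years (i - 1) 0 + 1 then
            (max st.1 (st.2 + 1), st.2 + 1)
          else (st.1, 1))
        ((1 : Int), (1 : Int))
    decide (st.1 ≤ max_consecutive)

-- ===== PORT B =====
-- B-side helper: B's while loop 'while k <= max_consecutive and (y + k) in s: k += 1'.
-- Fuel recursion: s.length + 1 fuel always suffices, since k only advances while y+k ∈ s
-- and y, y+1, …, y+k-1 are then k distinct members of s (proved in pvLoop_gt_iff below).
def pvLoop (s : List Int) (y mc : Int) : Nat → Int → Int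
  | 0, k => k
  | fuel + 1, k =>
    if k ≤ mc && PySem.Set.contains s (y + k) then pvLoop s y mc fuel (k + 1) else k

-- literal transliteration of B: some member starts a run longer than max_consecutive → False
def check_consecutive_years_alt (years_list : List Int) (new_year : Int) (max_consecutive : Int) : Bool :=
  if years_list = [] then true
  else
    let s : PySem.Set Int := PySem.Set.add (PySem.Set.ofList years_list) new_year
    !(s.any (fun y => decide (max_consecutive < pvLoop s y max_consecutive (s.length + 1) 0)))

-- ===== PRECONDITION & SPEC =====
def Spec_check_consecutive_years (years_list : List Int) (new_year : Int) (max_consecutive : Int) (out : Bool) : Prop := out = check_consecutive_years_alt years_list new_year max_consecutive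
instance (years_list : List Int) (new_year : Int) (max_consecutive : Int) (out : Bool) : Decidable (Spec_check_consecutive_years years_list new_year max_consecutive out) := by unfold Spec_check_consecutive_years; infer_instance

-- ===== CLAIM (what is proved, stated in full; the proofs are below) =====
def Claim_equal_check_consecutive_years : Prop := ∀ (years_list : List Int) (new_year : Int) (max_consecutive : Int), Dom_check_consecutive_years years_list new_year max_consecutive → Spec_check_consecutive_years years_list new_year max_consecutive (check_consecutive_years years_list new_year max_consecutive)

-- ===== LEMMAS AND PROOFS =====

-- A's loop body as a function of the two adjacent elements
def pvStep (st : Int × Int) (p q : Int) : Int × Int :=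
  if q = p + 1 then (max st.1 (st.2 + 1), st.2 + 1) else (st.1, 1)

-- A's loop as structural recursion over the tail of the sorted list
def pvScan (st : Int × Int) (prev : Int) : List Int → Int × Int
  | [] => st
  | x :: xs => pvScan (pvStep st prev x) x xs

-- the window property B tests for (negated): y starts mc+1 consecutive members of U
def pvWin (U : List Int) (mc y : Int) : Prop := ∀ k : Int, 0 ≤ k → k ≤ mc → y + k ∈ U

theorem pvScan_fst_le : ∀ (xs : List Int) (st : Int × Int) (prev : Int),
    st.1 ≤ (pvScan st prev xs).1 := by
  intro xs
  induction xs with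
  | nil => intro st prev; simp [pvScan]
  | cons x xs ih =>
    intro st prev
    have h := ih (pvStep st prev x) x
    have hstep : st.1 ≤ (pvStep st prev x).1 := by
      unfold pvStep; split <;> simp
    calc st.1 ≤ (pvStep st prev x).1 := hstep
      _ ≤ _ := h

theorem pvStep_state (st : Int × Int) (p q : Int) (h1 : 1 ≤ st.2) (h2 : st.2 ≤ st.1) :
    1 ≤ (pvStep st p q).2 ∧ (pvStep st p q).2 ≤ (pvStep st p q).1 := by
  unfold pvStep; split <;> constructor <;> simp <;> omega

theorem pvPairwise_head_le {h : Int} {l : List Int} (hpw : (h :: l).Pairwise (· < ·))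
    {z : Int} (hz : z ∈ h :: l) : h ≤ z := by
  rcases List.mem_cons.mp hz with rfl | hz
  · exact le_refl _
  · exact le_of_lt ((List.pairwise_cons.mp hpw).1 z hz)

-- direction A→B: if the scan's max exceeds mc, some window of mc+1 consecutive members exists
theorem pvScan_gt : ∀ (xs : List Int) (st : Int × Int) (prev mc : Int) (U : List Int),
    0 ≤ mc →
    (∀ x ∈ xs, x ∈ U) →
    (∀ j : Int, 0 ≤ j → j < st.2 → prev - j ∈ U) →
    (mc < st.1 → ∃ y ∈ U, pvWin U mc y) →
    mc < (pvScan st prev xs).1 → ∃ y ∈ U, pvWin U mc y := by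
  intro xs
  induction xs with
  | nil => intro st prev mc U _ _ _ hm h; exact hm h
  | cons x xs ih =>
    intro st prev mc U hmc hsub hrun hm h
    have hsub' : ∀ z ∈ xs, z ∈ U := fun z hz => hsub z (List.mem_cons_of_mem _ hz)
    have hxU : x ∈ U := hsub x List.mem_cons_self
    by_cases hx : x = prev + 1
    · -- run continues
      have hrun' : ∀ j : Int, 0 ≤ j → j < (pvStep st prev x).2 → x - j ∈ U := by
        intro j hj0 hj
        simp only [pvStep, if_pos hx] at hj
        by_cases hj0' : j = 0
        · simpa [hj0'] using hxU
        · have : x - j = prev - (j - 1) := by omega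
          rw [this]
          exact hrun (j - 1) (by omega) (by omega)
      refine ih (pvStep st prev x) x mc U hmc hsub' hrun' ?_ ?_
      · intro hgt
        simp only [pvStep, if_pos hx] at hgt
        by_cases hc : st.2 + 1 ≤ st.1
        · exact hm (by omega)
        · -- the fresh run itself exceeds mc: window starts at x - mc
          have hmcle : mc < (pvStep st prev x).2 := by
            simp only [pvStep, if_pos hx]; omega
          refine ⟨x - mc, ?_, ?_⟩
          · have := hrun' mc hmc hmcle
            simpa using this
          · intro k hk0 hkmc
            have : x - mc + k = x - (mc - k) := by omega
            rw [this]
            exact hrun' (mc - k) (by omega) (by omega)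
      · simpa [pvScan] using h
    · -- run breaks
      have hrun' : ∀ j : Int, 0 ≤ j → j < (pvStep st prev x).2 → x - j ∈ U := by
        intro j hj0 hj
        simp only [pvStep, if_neg hx] at hj
        have : j = 0 := by omega
        simpa [this] using hxU
      refine ih (pvStep st prev x) x mc U hmc hsub' hrun' ?_ ?_
      · intro hgt
        simp only [pvStep, if_neg hx] at hgt
        exact hm hgt
      · simpa [pvScan] using h

-- direction B→A: a window of K+1 consecutive members forces the scan's max up
theorem pvScan_ge_window : ∀ (xs : List Int) (st : Int × Int) (prev y K : Int),
    (prev :: xs).Pairwise (· < ·) →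
    1 ≤ st.2 → st.2 ≤ st.1 →
    0 ≤ K →
    (∀ k : Int, 0 ≤ k → k ≤ K → y + k ∈ prev :: xs) →
    (y = prev → st.2 + K ≤ (pvScan st prev xs).1) ∧
    (y ≠ prev → K + 1 ≤ (pvScan st prev xs).1) := by
  intro xs
  induction xs with
  | nil =>
    intro st prev y K _ h1 h2 hK hwin
    have hy : y ∈ ([prev] : List Int) := by simpa using hwin 0 le_rfl hK
    have hyK : y + K ∈ ([prev] : List Int) := hwin K hK le_rfl
    simp only [List.mem_singleton] at hy hyK
    have hK0 : K = 0 := by omega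
    constructor
    · intro _; simp [pvScan]; omega
    · intro hne; exact absurd hy hne
  | cons x xs ih =>
    intro st prev y K hpw h1 h2 hK hwin
    have hpx : prev < x := (List.pairwise_cons.mp hpw).1 x List.mem_cons_self
    have hpw' : (x :: xs).Pairwise (· < ·) := (List.pairwise_cons.mp hpw).2
    have hst' := pvStep_state st prev x h1 h2
    constructor
    · -- y = prev: the run extends from the current state
      rintro rfl
      by_cases hK0 : K = 0
      · subst hK0
        have := pvScan_fst_le xs (pvStep st y x) x
        have hstep : st.1 ≤ (pvStep st y x).1 := by
          unfold pvStep; split <;> simp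
        simp only [pvScan]; omega
      · -- K ≥ 1: x must be y + 1, the run continues
        have h1mem : y + 1 ∈ y :: x :: xs := hwin 1 (by omega) (by omega)
        have h1mem' : y + 1 ∈ x :: xs := by
          rcases List.mem_cons.mp h1mem with h | h
          · omega
          · exact h
        have hxle : x ≤ y + 1 := pvPairwise_head_le hpw' h1mem'
        have hx : x = y + 1 := by omega
        have hstep : pvStep st y x = (max st.1 (st.2 + 1), st.2 + 1) := by
          unfold pvStep; rw [if_pos (by omega)]
        have hwin' : ∀ k : Int, 0 ≤ k → k ≤ K - 1 → x + k ∈ x :: xs := by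
          intro k hk0 hk1
          have hm : y + (k + 1) ∈ y :: x :: xs := hwin (k + 1) (by omega) (by omega)
          rcases List.mem_cons.mp hm with h | h
          · omega
          · have : x + k = y + (k + 1) := by omega
            rwa [this]
        have := (ih (pvStep st y x) x x (K - 1) hpw' (by omega) (by rw [hstep]; simp)
          (by omega) hwin').1 rfl
        simp only [pvScan]
        rw [hstep] at this ⊢
        simp only at this ⊢
        omega
    · -- y ≠ prev: the whole window lies in x :: xs
      intro hne
      have hyin : y ∈ prev :: x :: xs := by simpa using hwin 0 le_rfl hK
      have hyin' : y ∈ x :: xs := by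
        rcases List.mem_cons.mp hyin with h | h
        · exact absurd h hne
        · exact h
      have hyge : x ≤ y := pvPairwise_head_le hpw' hyin'
      have hwin' : ∀ k : Int, 0 ≤ k → k ≤ K → y + k ∈ x :: xs := by
        intro k hk0 hk1
        rcases List.mem_cons.mp (hwin k hk0 hk1) with h | h
        · omega
        · exact h
      have hih := ih (pvStep st prev x) x y K hpw' hst'.1 hst'.2 hK hwin'
      by_cases hyx : y = x
      · have := hih.1 hyx
        simp only [pvScan]; omega
      · have := hih.2 hyx
        simp only [pvScan]; omega

-- the pyRange/pyGetD fold of PORT A equals pvScan on the sorted list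
theorem pvFold_eq_scan : ∀ (t : List Int) (a : Int) (st : Int × Int),
    (List.range t.length).foldl
      (fun st k => pvStep st ((a :: t).getD k 0) ((a :: t).getD (k + 1) 0)) st
      = pvScan st a t := by
  intro t
  induction t with
  | nil => intro a st; simp [pvScan]
  | cons x xs ih =>
    intro a st
    rw [List.length_cons, List.range_succ_eq_map, List.foldl_cons, List.foldl_map]
    simp only [List.getD_cons_zero, List.getD_cons_succ]
    exact ih x (pvStep st a x)

theorem pvBridge (a : Int) (t : List Int) (st : Int × Int) :
    (PySem.List.pyRange 1 (PySem.List.len (a :: t)) 1).foldl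
      (fun (st : Int × Int) i =>
        if PySem.List.pyGetD (a :: t) i 0 = PySem.List.pyGetD (a :: t) (i - 1) 0 + 1 then
          (max st.1 (st.2 + 1), st.2 + 1)
        else (st.1, 1)) st
      = pvScan st a t := by
  rw [PySem.List.len_eq, PySem.List.pyRange_one, List.foldl_map]
  have hlen : (((a :: t).length : Int) - 1).toNat = t.length := by
    simp [List.length_cons]
  rw [hlen]
  refine Eq.trans (PySem.List.foldl_congr_mem (List.range t.length) _
    (fun st k => pvStep st ((a :: t).getD k 0) ((a :: t).getD (k + 1) 0)) st ?_)
    (pvFold_eq_scan t a st)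
  intro acc k hk
  have h1 : (1 : Int) + (k : Int) = ((k + 1 : Nat) : Int) := by push_cast; ring
  rw [h1]
  rw [show ((k + 1 : Nat) : Int) - 1 = ((k : Nat) : Int) by push_cast; ring]
  rw [PySem.List.pyGetD_natCast, PySem.List.pyGetD_natCast]
  rfl

-- B's while loop, started at k with all of y..y+k-1 already seen in s and enough fuel,
-- exceeds mc exactly when y starts a window of mc+1 consecutive members of s
theorem pvLoop_gt_iff (s : List Int) (y mc : Int) :
    ∀ (fuel : Nat) (k : Int), 0 ≤ k →
    (∀ j : Int, 0 ≤ j → j < k → y + j ∈ s) →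
    ((s.length : Int) + 1 ≤ (fuel : Int) + k) →
    (mc < pvLoop s y mc fuel k ↔ pvWin s mc y) := by
  intro fuel
  induction fuel with
  | zero =>
    intro k hk0 hinv hfuel
    exfalso
    -- y, y+1, …, y+k-1 would be more than s.length distinct members of s
    have hnd : ((List.range k.toNat).map (fun j : Nat => y + (j : Int))).Nodup := by
      refine List.Nodup.map ?_ List.nodup_range
      intro a b hab
      have h' : y + (a : Int) = y + (b : Int) := hab
      omega
    have hsub : ((List.range k.toNat).map (fun j : Nat => y + (j : Int))) ⊆ s := by
      intro x hx
      simp only [List.mem_map, List.mem_range] at hx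
      obtain ⟨j, hj, rfl⟩ := hx
      exact hinv j (by omega) (by omega)
    have hlen := (hnd.subperm hsub).length_le
    simp only [List.length_map, List.length_range] at hlen
    omega
  | succ fuel ih =>
    intro k hk0 hinv hfuel
    have hb : ((decide (k ≤ mc) && PySem.Set.contains s (y + k)) = true) ↔ (k ≤ mc ∧ y + k ∈ s) := by
      simp
    rw [pvLoop]
    by_cases hcond : k ≤ mc ∧ y + k ∈ s
    · rw [if_pos (hb.mpr hcond)]
      refine ih (k + 1) (by omega) ?_ ?_
      · intro j hj0 hj1
        by_cases hjk : j = k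
        · subst hjk; exact hcond.2
        · exact hinv j hj0 (by omega)
      · push_cast at hfuel ⊢; omega
    · rw [if_neg (fun h => hcond (hb.mp h))]
      constructor
      · intro hgt j hj0 hj1
        exact hinv j hj0 (by omega)
      · intro hwin
        by_cases hkmc : k ≤ mc
        · exact absurd (hwin k hk0 hkmc) (fun h => hcond ⟨hkmc, h⟩)
        · omega

-- membership in A's deduplicated list and in B's set coincide
theorem pvMem_iff (ys : List Int) (ny x : Int) :
    x ∈ PySem.Set.ofList (ys ++ [ny]) ↔ x ∈ PySem.Set.add (PySem.Set.ofList ys) ny := by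
  rw [PySem.Set.mem_ofList, PySem.Set.mem_add, PySem.Set.mem_ofList, List.mem_append]
  simp

-- ===== VERDICT (by name: the statement is the Claim_ definition above) =====
theorem check_consecutive_years_spec : Claim_equal_check_consecutive_years := by
  intro ys ny mc _
  unfold Spec_check_consecutive_years check_consecutive_years check_consecutive_years_alt
  by_cases hys : ys = []
  · simp [hys]
  · rw [if_neg hys, if_neg hys]
    simp only []
    set S := PySem.Set.add (PySem.Set.ofList ys) ny with hS
    set u := PySem.List.sorted (PySem.Set.ofList (ys ++ [ny])) (fun x => x) false with hu
    have hmem : ∀ x : Int, x ∈ u ↔ x ∈ S := by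
      intro x
      rw [hu, PySem.List.mem_sorted]
      exact pvMem_iff ys ny x
    have hpw : u.Pairwise (· < ·) := by
      rw [hu]; exact PySem.List.sorted_ofList_pairwise_lt _
    have hnyS : ny ∈ S := by
      rw [hS, PySem.Set.mem_add]; right; rfl
    have hnyu : ny ∈ u := (hmem ny).mpr hnyS
    obtain ⟨a, t, hut⟩ : ∃ a t, u = a :: t := by
      cases hcase : u with
      | nil => rw [hcase] at hnyu; simp at hnyu
      | cons a t => exact ⟨a, t, rfl⟩
    rw [hut] at hmem hpw
    -- reduce A to pvScan
    have hA : ((PySem.List.pyRange 1 (PySem.List.len u) 1).foldl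
        (fun (st : Int × Int) i =>
          if PySem.List.pyGetD u i 0 = PySem.List.pyGetD u (i - 1) 0 + 1 then
            (max st.1 (st.2 + 1), st.2 + 1)
          else (st.1, 1)) ((1 : Int), (1 : Int))) = pvScan (1, 1) a t := by
      rw [hut]; exact pvBridge a t (1, 1)
    rw [hA, Bool.eq_iff_iff, decide_eq_true_iff, Bool.not_eq_true', List.any_eq_false]
    have hBy : ∀ y : Int,
        ((decide (mc < pvLoop S y mc (S.length + 1) 0)) = true) ↔ pvWin S mc y := by
      intro y
      exact (decide_eq_true_iff).trans (pvLoop_gt_iff S y mc (S.length + 1) 0 le_rfl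
        (by intro j hj0 hj1; omega) (by push_cast; omega))
    constructor
    · -- A true → B true
      intro hle y hyS
      rw [hBy y]
      intro hwin
      rcases Int.lt_or_le mc 0 with hneg | hmc0
      · -- mc < 0: the scan's max is at least 1, so A could not have returned true
        have h1 : (1 : Int) ≤ (pvScan (1, 1) a t).1 := pvScan_fst_le t (1, 1) a
        omega
      · -- y starts a window of mc+1 consecutive members: the scan must exceed mc
        have hwin' : ∀ k : Int, 0 ≤ k → k ≤ mc → y + k ∈ a :: t := by
          intro k hk0 hk1
          exact (hmem _).mpr (hwin k hk0 hk1)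
        have hw := pvScan_ge_window t (1, 1) a y mc hpw (by norm_num) (by norm_num) hmc0 hwin'
        by_cases hya : y = a
        · have := hw.1 hya; omega
        · have := hw.2 hya; omega
    · -- B true → A true
      intro hall
      by_contra hgt
      push Not at hgt
      rcases Int.lt_or_le mc 0 with hneg | hmc0
      · -- mc < 0: B is already false at y = ny (pvWin holds vacuously)
        have h := hall ny hnyS
        rw [hBy ny] at h
        exact h (fun k hk0 hk1 => by omega)
      · have hsub : ∀ x ∈ t, x ∈ a :: t := fun x hx => List.mem_cons_of_mem _ hx
        have hrun : ∀ j : Int, 0 ≤ j → j < ((1, 1) : Int × Int).2 → a - j ∈ a :: t := by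
          intro j hj0 hj1
          simp only at hj1
          have : j = 0 := by omega
          simp [this]
        have hm : mc < ((1, 1) : Int × Int).1 → ∃ y ∈ a :: t, pvWin (a :: t) mc y := by
          intro h1
          simp only at h1
          have hmc : mc = 0 := by omega
          refine ⟨a, List.mem_cons_self, ?_⟩
          intro k hk0 hk1
          rw [hmc] at hk1
          have : k = 0 := by omega
          simp [this]
        obtain ⟨y, hyU, hwin⟩ := pvScan_gt t (1, 1) a mc (a :: t) hmc0 hsub hrun hm hgt
        have h := hall y ((hmem y).mp hyU)
        rw [hBy y] at h
        exact h (fun k hk0 hk1 => (hmem _).mp (hwin k hk0 hk1))
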